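-- pv_equiv track=rewrite | github.com/saskeli/AoC_24 | task02b.py | dec_skip
-- ===== SOURCE A (Python) =====
-- def dec_skip(vals, loc):
--     if loc != 0 and loc != len(vals) - 1:
--         if not (0 < vals[loc + 1] - vals[loc - 1] <= 3):
--             return False
--     for i in range(loc + 2, len(vals)):
--         if not (0 < vals[i] - vals[i - 1] <= 3):
--             return False
--     return True
-- ===== SOURCE B (Python) =====
-- def dec_skip(vals, loc):
--     reduced = list(vals)
--     reduced.pop(loc)
--     start = max(loc, 1)
--     return all(0 < b - a <= 3 for a, b in zip(reduced[start - 1:], reduced[start:]))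
-- ===== Notes on version B (the rewrite author's own statement) =====
-- stated objective: simpler
-- what changed: Instead of A's special-cased bridge check vals[loc+1]-vals[loc-1] plus a separate index loop over the original list, B actually removes the element (reduced = list(vals); reduced.pop(loc)) and validates the reduced list with one uniform zip scan over adjacent pairs starting at max(loc,1), so bridge and tail are checked by the same code path.
-- outside the precondition, e.g. on dec_skip([1, 1, 2], -2): A returns False, B returns True; on dec_skip([], 0): A returns True, B raises IndexError
import Mathlib
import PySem

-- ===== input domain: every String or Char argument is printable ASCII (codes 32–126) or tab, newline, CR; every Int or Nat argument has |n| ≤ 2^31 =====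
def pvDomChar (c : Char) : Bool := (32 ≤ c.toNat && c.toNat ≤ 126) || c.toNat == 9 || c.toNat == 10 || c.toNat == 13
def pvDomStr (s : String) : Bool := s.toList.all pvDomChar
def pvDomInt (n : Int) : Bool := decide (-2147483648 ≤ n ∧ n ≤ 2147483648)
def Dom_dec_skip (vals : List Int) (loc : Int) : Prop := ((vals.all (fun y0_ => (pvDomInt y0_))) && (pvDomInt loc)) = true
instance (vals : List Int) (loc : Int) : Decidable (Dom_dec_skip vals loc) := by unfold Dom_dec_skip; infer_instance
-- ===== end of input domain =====

-- B replaces A's special-cased bridge check plus index loop by building the reduced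
-- list and validating it with one uniform adjacent-pair zip scan (simpler, same cost).

-- ===== PORT A =====
-- the for-loop of A (early return False = .all)
def dec_skipTail (vals : List Int) (loc : Int) : Bool :=
  (PySem.List.pyRange (loc + 2) (vals.length : Int) 1).all fun i =>
    decide (0 < PySem.List.pyGetD vals i 0 - PySem.List.pyGetD vals (i - 1) 0 ∧
            PySem.List.pyGetD vals i 0 - PySem.List.pyGetD vals (i - 1) 0 ≤ 3)

def dec_skip (vals : List Int) (loc : Int) : Bool :=
  if loc ≠ 0 ∧ loc ≠ (vals.length : Int) - 1 then
    if ¬ (0 < PySem.List.pyGetD vals (loc + 1) 0 - PySem.List.pyGetD vals (loc - 1) 0 ∧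
          PySem.List.pyGetD vals (loc + 1) 0 - PySem.List.pyGetD vals (loc - 1) 0 ≤ 3) then
      false
    else dec_skipTail vals loc
  else dec_skipTail vals loc

-- ===== PORT B =====
def dec_skip_alt (vals : List Int) (loc : Int) : Bool :=
  match PySem.List.pop? vals loc with  -- reduced = list(vals); reduced.pop(loc); none = IndexError, outside Pre_
  | none => false
  | some (_, reduced) =>
  let start := max loc 1
  ((PySem.List.slice reduced (some (start - 1)) none).zip
    (PySem.List.slice reduced (some start) none)).all fun p =>
      decide (0 < p.2 - p.1 ∧ p.2 - p.1 ≤ 3)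

-- ===== PRECONDITION & SPEC =====
-- Pre_ restricts loc to the natural skip-index domain 0 ≤ loc < len(vals): for loc ≥ len(vals)
-- A raises IndexError and so does B's pop; for negative loc A's value comes from Python
-- negative-index wraparound, outside the function's natural domain (B's pop also wraps, but
-- differently); on ([], 0) A returns True while B's pop raises, so it is excluded too.
def Pre_dec_skip (vals : List Int) (loc : Int) : Prop :=
  0 ≤ loc ∧ loc < (vals.length : Int)
instance (vals : List Int) (loc : Int) : Decidable (Pre_dec_skip vals loc) := by
  unfold Pre_dec_skip; infer_instance

def pvWitness_dec_skip : List Int × Int := ([1, 2, 3, 5], 1)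

def Spec_dec_skip (vals : List Int) (loc : Int) (out : Bool) : Prop := out = dec_skip_alt vals loc
instance (vals : List Int) (loc : Int) (out : Bool) : Decidable (Spec_dec_skip vals loc out) := by
  unfold Spec_dec_skip; infer_instance

-- ===== CLAIM (what is proved, stated in full; the proofs are below) =====
def Claim_equal_dec_skip : Prop := ∀ (vals : List Int) (loc : Int), Dom_dec_skip vals loc → Pre_dec_skip vals loc → Spec_dec_skip vals loc (dec_skip vals loc)

-- ===== LEMMAS AND PROOFS =====

-- the adjacent-pair check both programs apply
def chk (a b : Int) : Bool := decide (0 < b - a ∧ b - a ≤ 3)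

-- "all adjacent pairs of l satisfy chk"
def pairsAll : List Int → Bool
  | a :: b :: t => chk a b && pairsAll (b :: t)
  | _ => true

theorem pairsAll_short (l : List Int) (hlen : l.length ≤ 1) : pairsAll l = true := by
  match l, hlen with
  | [], _ => rfl
  | [a], _ => rfl

-- B's zip scan is pairsAll
theorem zip_tail_all (l : List Int) :
    ((l.zip l.tail).all fun p => decide (0 < p.2 - p.1 ∧ p.2 - p.1 ≤ 3)) = pairsAll l := by
  induction l with
  | nil => rfl
  | cons a t ih =>
    cases t with
    | nil => rfl
    | cons b t2 =>
      simp only [List.tail_cons, List.zip_cons_cons, List.all_cons, pairsAll]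
      rw [← ih]
      rfl

-- A's index loop is pairsAll of a suffix
theorem loop_all (fuel : Nat) (vals : List Int) (j : Nat) (hf : vals.length - j ≤ fuel)
    (hj : 1 ≤ j) :
    ((PySem.List.pyRange (j : Int) (vals.length : Int) 1).all fun i =>
      decide (0 < PySem.List.pyGetD vals i 0 - PySem.List.pyGetD vals (i - 1) 0 ∧
              PySem.List.pyGetD vals i 0 - PySem.List.pyGetD vals (i - 1) 0 ≤ 3))
    = pairsAll (vals.drop (j - 1)) := by
  induction fuel generalizing j with
  | zero =>
    have hlen : vals.length ≤ j := by omega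
    rw [PySem.List.pyRange_one_eq_nil (by exact_mod_cast hlen)]
    rw [pairsAll_short _ (by simp [List.length_drop]; omega)]
    rfl
  | succ m ih =>
    by_cases hlt : j < vals.length
    · rw [PySem.List.pyRange_one_cons (by exact_mod_cast hlt), List.all_cons]
      rw [show ((j : Int) + 1) = ((j + 1 : Nat) : Int) by push_cast; ring]
      rw [ih (j + 1) (by omega) (by omega)]
      have hgj : PySem.List.pyGetD vals (j : Int) 0 = vals[j] := by
        rw [PySem.List.pyGetD_natCast, List.getD_eq_getElem _ _ hlt]
      have hgj1 : PySem.List.pyGetD vals ((j : Int) - 1) 0 = vals[j - 1] := by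
        have : (j : Int) - 1 = ((j - 1 : Nat) : Int) := by omega
        rw [this, PySem.List.pyGetD_natCast, List.getD_eq_getElem _ _ (by omega)]
      have hd1 : vals.drop (j - 1) = vals[j - 1] :: vals.drop j := by
        have h := List.drop_eq_getElem_cons (l := vals) (i := j - 1) (by omega)
        rwa [show j - 1 + 1 = j by omega] at h
      have hd2 : vals.drop j = vals[j] :: vals.drop (j + 1) :=
        List.drop_eq_getElem_cons hlt
      rw [hd1, hd2, pairsAll, ← hd2]
      simp only [hgj, hgj1, chk, Nat.add_sub_cancel]
    · have hlen : vals.length ≤ j := by omega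
      rw [PySem.List.pyRange_one_eq_nil (by exact_mod_cast hlen)]
      rw [pairsAll_short _ (by simp [List.length_drop]; omega)]
      rfl

-- B equals pairsAll of the reduced list's relevant suffix
theorem alt_eq_pairsAll (vals : List Int) (k : Nat)
    (h : k < vals.length) :
    dec_skip_alt vals (k : Int)
      = pairsAll ((vals.take k ++ vals.drop (k + 1)).drop (k - 1) ) := by
  unfold dec_skip_alt
  rw [PySem.List.pop?_natCast vals k h, List.eraseIdx_eq_take_drop_succ]
  have hstart : max (k : Int) 1 = ((max k 1 : Nat) : Int) := by
    rcases Nat.eq_zero_or_pos k with h0 | h0 <;> simp [h0]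
  have hsub : ((max k 1 : Nat) : Int) - 1 = ((max k 1 - 1 : Nat) : Int) := by
    have : 1 ≤ max k 1 := le_max_right _ _
    omega
  simp only [hstart, hsub, PySem.List.slice_from_natCast]
  have hmax1 : max k 1 - 1 = k - 1 := by omega
  have htail : (vals.take k ++ vals.drop (k + 1)).drop (max k 1)
      = ((vals.take k ++ vals.drop (k + 1)).drop (max k 1 - 1)).tail := by
    rw [List.tail_drop]
    congr 1
    omega
  rw [htail, zip_tail_all, hmax1]

theorem dec_skip_eq_alt (vals : List Int) (loc : Int)
    (hpre : Pre_dec_skip vals loc) : dec_skip vals loc = dec_skip_alt vals loc := by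
  have h0 : 0 ≤ loc := hpre.1
  lift loc to ℕ using h0 with k
  have hk : k < vals.length := by exact_mod_cast hpre.2
  rw [alt_eq_pairsAll vals k hk]
  have htail : dec_skipTail vals (k : Int) = pairsAll (vals.drop (k + 1)) := by
    unfold dec_skipTail
    have : (k : Int) + 2 = ((k + 2 : Nat) : Int) := by push_cast; ring
    rw [this, loop_all vals.length vals (k + 2) (by omega) (by omega)]
    simp
  rcases Nat.eq_zero_or_pos k with hk0 | hk1
  · -- loc = 0: no bridge; reduced = vals.drop 1
    subst hk0
    simp only [Nat.cast_zero] at htail ⊢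
    unfold dec_skip
    simp only [ne_eq, not_true_eq_false, false_and, if_false]
    rw [htail]
    simp
  · -- 1 ≤ k
    have hklen : k < vals.length := hk
    have hlentake : (vals.take k).length = k := by simp; omega
    have hdropsplit : (vals.take k ++ vals.drop (k + 1)).drop (k - 1)
        = (vals.take k).drop (k - 1) ++ vals.drop (k + 1) := by
      rw [List.drop_append_of_le_length (by omega)]
    have hsingle : (vals.take k).drop (k - 1) = [vals[k - 1]] := by
      apply List.ext_getElem
      · simp; omega
      · intro i h1 h2
        simp only [List.getElem_drop, List.getElem_take]
        have : i = 0 := by simp at h2; omega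
        subst this
        simp
    by_cases hlast : k = vals.length - 1
    · -- loc = len - 1: both sides trivially true
      have hdropnil : vals.drop (k + 1) = [] := by
        apply List.drop_eq_nil_of_le; omega
      unfold dec_skip
      have hcond : ¬ ((k : Int) ≠ 0 ∧ (k : Int) ≠ (vals.length : Int) - 1) := by
        intro ⟨_, h2⟩; apply h2; omega
      rw [if_neg hcond, htail, hdropsplit, hsingle, hdropnil]
      rfl
    · -- 1 ≤ k < len - 1: bridge check = head pair of the reduced suffix
      have hk1len : k + 1 < vals.length := by omega
      have hcond : ((k : Int) ≠ 0 ∧ (k : Int) ≠ (vals.length : Int) - 1) := by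
        constructor
        · omega
        · intro h; apply hlast; omega
      unfold dec_skip
      rw [if_pos hcond, htail, hdropsplit, hsingle]
      have hg1 : PySem.List.pyGetD vals ((k : Int) + 1) 0 = vals[k + 1] := by
        have : (k : Int) + 1 = ((k + 1 : Nat) : Int) := by push_cast; ring
        rw [this, PySem.List.pyGetD_natCast, List.getD_eq_getElem _ _ hk1len]
      have hg2 : PySem.List.pyGetD vals ((k : Int) - 1) 0 = vals[k - 1] := by
        have : (k : Int) - 1 = ((k - 1 : Nat) : Int) := by omega
        rw [this, PySem.List.pyGetD_natCast, List.getD_eq_getElem _ _ (by omega)]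
      have hd2 : vals.drop (k + 1) = vals[k + 1] :: vals.drop (k + 2) :=
        List.drop_eq_getElem_cons hk1len
      rw [hg1, hg2, hd2]
      show _ = pairsAll (vals[k - 1] :: vals[k + 1] :: vals.drop (k + 2))
      rw [pairsAll, ← hd2]
      by_cases hbr : 0 < vals[k + 1] - vals[k - 1] ∧ vals[k + 1] - vals[k - 1] ≤ 3
      · rw [if_neg (by simpa using hbr)]
        have hc : chk vals[k - 1] vals[k + 1] = true := by
          simp only [chk, decide_eq_true_eq]; exact hbr
        rw [hc, Bool.true_and]
      · rw [if_pos (by simpa using hbr)]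
        have hc : chk vals[k - 1] vals[k + 1] = false := by
          simp only [chk, decide_eq_false_iff_not]; exact hbr
        rw [hc, Bool.false_and]

-- ===== VERDICT (by name: the statement is the Claim_ definition above) =====
theorem dec_skip_spec : Claim_equal_dec_skip := by
  intro vals loc _ hpre
  unfold Spec_dec_skip
  exact dec_skip_eq_alt vals loc hpre
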